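-- pv_equiv track=rewrite | github.com/Antonio-87/DZ_professional_python | DZ_regular_expressions/main.py | merge_duplicates
-- ===== SOURCE A (Python) =====
-- def merge_duplicates(contacts_list):
--     for i in contacts_list:
--         contacts_list_updated = []
--         for j in contacts_list:
--             if i[0] == j[0] and i[1] == j[1] and i is not j:
--                 if i[2] == '':
--                     i[2] = j[2]
--                 if i[3] == '':
--                     i[3] = j[3]
--                 if i[4] == '':
--                     i[4] = j[4]
--                 if i[5] == '':
--                     i[5] = j[5]
--                 if i[6] == '':
--                     i[6] = j[6]
--     for rows in contacts_list:
--         if rows not in contacts_list_updated and len(rows) < 8: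
--             contacts_list_updated.append(rows)
--     return contacts_list_updated
-- ===== SOURCE B (Python) =====
-- # Re-implementation: one pass counting (name,surname) keys, one pass collecting
-- # per-key first non-empty fill values into a dict, one pass filling empties and
-- # deduplicating with a set (order-preserving). Mutates the rows in place, like
-- # the original.
-- def merge_duplicates(contacts_list):
--     counts = {}
--     for row in contacts_list:
--         key = (row[0], row[1])
--         counts[key] = counts.get(key, 0) + 1
--     fills = {}
--     for row in contacts_list:
--         key = (row[0], row[1])
--         if counts[key] > 1:
--             f = fills.setdefault(key, [''] * 5)
--             for k in range(5):
--                 if f[k] == '' and row[k + 2] != '':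
--                     f[k] = row[k + 2]
--     result = []
--     seen = set()
--     for row in contacts_list:
--         key = (row[0], row[1])
--         if counts[key] > 1:
--             f = fills[key]
--             for k in range(5):
--                 if row[k + 2] == '':
--                     row[k + 2] = f[k]
--         if len(row) < 8 and tuple(row) not in seen:
--             seen.add(tuple(row))
--             result.append(row)
--     return result
-- ===== Notes on version B (the rewrite author's own statement) =====
-- stated objective: alternative
-- what changed: Replaces A's all-pairs in-place merging and 'not in list' dedup by three passes: a dict counting pass over (name,surname), a pass collecting per-key first non-empty fill values into a dict, and one pass that fills empty fields from the dict and deduplicates with an order-preserving set.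
-- outside the precondition, e.g. on merge_duplicates([]): A raises UnboundLocalError, B returns []
import Mathlib
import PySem

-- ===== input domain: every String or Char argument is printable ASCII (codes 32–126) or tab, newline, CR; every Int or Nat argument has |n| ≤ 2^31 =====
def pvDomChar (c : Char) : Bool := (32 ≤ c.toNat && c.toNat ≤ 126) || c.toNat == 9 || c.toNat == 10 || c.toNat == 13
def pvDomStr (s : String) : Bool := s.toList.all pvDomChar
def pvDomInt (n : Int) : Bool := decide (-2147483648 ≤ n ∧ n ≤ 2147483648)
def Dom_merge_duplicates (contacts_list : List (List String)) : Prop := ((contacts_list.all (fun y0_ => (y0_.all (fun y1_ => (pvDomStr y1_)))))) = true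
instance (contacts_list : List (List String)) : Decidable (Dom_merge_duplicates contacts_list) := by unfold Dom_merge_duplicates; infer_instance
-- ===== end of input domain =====

-- B replaces A's all-pairs merge + list-membership dedup by three dict/set passes
-- (count keys, collect fill values, fill and dedup); both Pythons mutate the rows of
-- the input list in place, and the equivalence proved here is about the RETURN value.


-- ===== PORT A =====
-- 'if i[k] == "": i[k] = j[k]'
def pvFill1 (i j : List String) (k : Nat) : List String :=
  if i.getD k "" = "" then i.set k (j.getD k "") else i

-- the body of A's inner loop for one j (the 'i is not j' pair-skip is realised
-- structurally: the fold below never presents i's own slot as j)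
def pvFillFrom (i j : List String) : List String :=
  if i.getD 0 "" = j.getD 0 "" ∧ i.getD 1 "" = j.getD 1 "" then
    pvFill1 (pvFill1 (pvFill1 (pvFill1 (pvFill1 i j 2) j 3) j 4) j 5) j 6
  else i

-- A's outer loop: rows before i are already updated ('done'), rows after are original;
-- the inner loop scans done-rows then the rows after i (i's own slot is skipped: 'i is not j')
def pvOuter (done todo : List (List String)) : List (List String) :=
  match todo with
  | [] => done
  | r :: rest => pvOuter (done ++ [rest.foldl pvFillFrom (done.foldl pvFillFrom r)]) rest

def merge_duplicates (contacts_list : List (List String)) : List (List String) :=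
  (pvOuter [] contacts_list).foldl
    (fun acc rows => if rows ∉ acc ∧ rows.length < 8 then acc ++ [rows] else acc) []

-- ===== PORT B =====
-- 'for k in range(5): if f[k] == "" and row[k+2] != "": f[k] = row[k+2]'
def pvUpdF (f row : List String) : List String :=
  [0, 1, 2, 3, 4].foldl (fun f k =>
    if f.getD k "" = "" ∧ ¬ row.getD (k + 2) "" = "" then f.set k (row.getD (k + 2) "") else f) f

-- 'for k in range(5): if row[k+2] == "": row[k+2] = f[k]'
def pvFillRow (f row : List String) : List String :=
  [0, 1, 2, 3, 4].foldl (fun r k =>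
    if r.getD (k + 2) "" = "" then r.set (k + 2) (f.getD k "") else r) row

def merge_duplicates_alt (contacts_list : List (List String)) : List (List String) :=
  let counts : PySem.Dict (String × String) Int :=
    contacts_list.foldl (fun d row =>
      d.insert (row.getD 0 "", row.getD 1 "") (d.getD (row.getD 0 "", row.getD 1 "") 0 + 1))
      PySem.Dict.empty
  let fills : PySem.Dict (String × String) (List String) :=
    contacts_list.foldl (fun d row =>
      if 1 < counts.getD (row.getD 0 "", row.getD 1 "") 0 then
        d.insert (row.getD 0 "", row.getD 1 "")
          (pvUpdF (d.getD (row.getD 0 "", row.getD 1 "") ["", "", "", "", ""]) row)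
      else d) PySem.Dict.empty
  (contacts_list.foldl (fun (st : List (List String) × PySem.Set (List String)) row =>
      let row := if 1 < counts.getD (row.getD 0 "", row.getD 1 "") 0 then
          pvFillRow (fills.getD (row.getD 0 "", row.getD 1 "") ["", "", "", "", ""]) row
        else row
      if row.length < 8 ∧ row ∉ st.2 then (st.1 ++ [row], PySem.Set.add st.2 row) else st)
    ([], PySem.Set.empty)).1

-- ===== PRECONDITION & SPEC =====
def pvKey (r : List String) : String × String := (r.getD 0 "", r.getD 1 "")

-- A raises outside Pre_: UnboundLocalError on [], IndexError when some row has fewer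
-- than 2 fields, or a row sharing (name,surname) with another row has fewer than 7.
def Pre_merge_duplicates (contacts_list : List (List String)) : Prop :=
  contacts_list ≠ [] ∧ ∀ r ∈ contacts_list, 2 ≤ r.length ∧
    (2 ≤ contacts_list.countP (fun s => pvKey s == pvKey r) → 7 ≤ r.length)

instance (contacts_list : List (List String)) : Decidable (Pre_merge_duplicates contacts_list) := by
  unfold Pre_merge_duplicates; infer_instance

def pvWitness_merge_duplicates : List (List String) :=
  [["a", "b", "1", "", "", "", ""], ["a", "b", "", "2", "", "", ""]]

def Spec_merge_duplicates (contacts_list : List (List String)) (out : List (List String)) : Prop :=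
  out = merge_duplicates_alt contacts_list
instance (contacts_list : List (List String)) (out : List (List String)) : Decidable (Spec_merge_duplicates contacts_list out) := by
  unfold Spec_merge_duplicates; infer_instance

-- ===== CLAIM (what is proved, stated in full; the proofs are below) =====
def Claim_equal_merge_duplicates : Prop := ∀ (contacts_list : List (List String)), Dom_merge_duplicates contacts_list → Pre_merge_duplicates contacts_list → Spec_merge_duplicates contacts_list (merge_duplicates contacts_list)

-- ===== LEMMAS AND PROOFS =====

def pvO (x : String) (d : List String) (k : Nat) : String := if x = "" then d.getD k "" else x

theorem fillFrom_cons (a b x2 x3 x4 x5 x6 : String) (t : List String) (d : List String) :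
    pvFillFrom (a::b::x2::x3::x4::x5::x6::t) d =
      if pvKey d = (a, b) then
        a::b::(pvO x2 d 2)::(pvO x3 d 3)::(pvO x4 d 4)::(pvO x5 d 5)::(pvO x6 d 6)::t
      else a::b::x2::x3::x4::x5::x6::t := by
  have hc : ((a::b::x2::x3::x4::x5::x6::t : List String).getD 0 "" = d.getD 0 "" ∧
      (a::b::x2::x3::x4::x5::x6::t : List String).getD 1 "" = d.getD 1 "") ↔ pvKey d = (a, b) := by
    simp [pvKey, Prod.ext_iff, List.getD]
    constructor <;> (rintro ⟨h1, h2⟩; exact ⟨h1.symm, h2.symm⟩)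
  rw [pvFillFrom, if_congr hc rfl rfl]
  split_ifs with hk
  · by_cases h2 : x2 = "" <;> by_cases h3 : x3 = "" <;> by_cases h4 : x4 = "" <;>
      by_cases h5 : x5 = "" <;> by_cases h6 : x6 = "" <;>
      simp [pvFill1, pvO, List.getD, List.set, h2, h3, h4, h5, h6]
  · rfl

def pvFirst (l : List (List String)) (κ : String × String) (k : Nat) : String :=
  match l with
  | [] => ""
  | s :: t => if pvKey s = κ ∧ ¬ s.getD k "" = "" then s.getD k "" else pvFirst t κ k

def pvW (x : String) (D : List (List String)) (κ : String × String) (k : Nat) : String :=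
  if x = "" then pvFirst D κ k else x

theorem pvW_cons (d : List String) (D : List (List String)) (κ : String × String)
    (hk : pvKey d = κ) : ∀ (x : String) (k : Nat), pvW (pvO x d k) D κ k = pvW x (d :: D) κ k := by
  intro x k
  by_cases hx : x = "" <;> by_cases hd : d.getD k "" = "" <;>
    simp [pvW, pvO, pvFirst, hx, hd, hk]

theorem pvW_cons_ne (d : List String) (D : List (List String)) (κ : String × String)
    (hk : ¬ pvKey d = κ) : ∀ (x : String) (k : Nat), pvW x (d :: D) κ k = pvW x D κ k := by
  intro x k
  simp [pvW, pvFirst, hk]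

theorem inner7 (D : List (List String)) (a b x2 x3 x4 x5 x6 : String) (t : List String) :
    D.foldl pvFillFrom (a::b::x2::x3::x4::x5::x6::t) =
      a::b::(pvW x2 D (a,b) 2)::(pvW x3 D (a,b) 3)::(pvW x4 D (a,b) 4)::(pvW x5 D (a,b) 5)::(pvW x6 D (a,b) 6)::t := by
  induction D generalizing x2 x3 x4 x5 x6 with
  | nil => simp [pvW, pvFirst]
  | cons d D ih =>
    rw [List.foldl_cons, fillFrom_cons]
    by_cases hk : pvKey d = (a, b)
    · rw [if_pos hk, ih]
      simp only [pvW_cons d D (a, b) hk]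
    · rw [if_neg hk, ih]
      simp only [pvW_cons_ne d D (a, b) hk]

theorem inner_nomatch (D : List (List String)) (r : List String)
    (h : ∀ d ∈ D, ¬ pvKey d = pvKey r) : D.foldl pvFillFrom r = r := by
  induction D with
  | nil => rfl
  | cons d D ih =>
    rw [List.foldl_cons]
    have : pvFillFrom r d = r := by
      rw [pvFillFrom, if_neg]
      intro ⟨h1, h2⟩
      exact h d (List.mem_cons_self ..) (by rw [pvKey, pvKey, h1, h2])
    rw [this]
    exact ih fun d hd => h d (List.mem_cons_of_mem _ hd)

def pvPick (c : List (List String)) (r : List String) (k : Nat) : String :=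
  if r.getD k "" = "" then pvFirst c (pvKey r) k else r.getD k ""

def pvTarget (c : List (List String)) (r : List String) : List String :=
  ((((r.set 2 (pvPick c r 2)).set 3 (pvPick c r 3)).set 4 (pvPick c r 4)).set 5 (pvPick c r 5)).set 6 (pvPick c r 6)

theorem set_getD_self (l : List String) (k : Nat) : l.set k (l.getD k "") = l := by
  induction l generalizing k with
  | nil => rfl
  | cons a t ih =>
    cases k with
    | zero => simp [List.set, List.getD]
    | succ n => simpa [List.set, List.getD] using ih n

theorem pvFirst_append (A B : List (List String)) (κ : String × String) (k : Nat) :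
    pvFirst (A ++ B) κ k = if pvFirst A κ k = "" then pvFirst B κ k else pvFirst A κ k := by
  induction A with
  | nil => simp [pvFirst]
  | cons s A ih =>
    by_cases h : pvKey s = κ ∧ ¬ s.getD k "" = ""
    · rw [List.cons_append, pvFirst, if_pos h, pvFirst, if_pos h, if_neg h.2]
    · rw [List.cons_append, pvFirst, if_neg h, pvFirst, if_neg h, ih]

theorem pvFirst_of_countP_zero (c : List (List String)) (κ : String × String) (k : Nat)
    (h : c.countP (fun s => pvKey s == κ) = 0) : pvFirst c κ k = "" := by
  induction c with
  | nil => rfl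
  | cons s t ih =>
    rw [List.countP_cons] at h
    have hs : ¬ pvKey s = κ := by
      intro he; simp [he] at h
    rw [pvFirst, if_neg (fun hc => hs hc.1)]
    exact ih (by omega)

theorem pvFirst_single (c : List (List String)) (κ : String × String) (k : Nat) (s : List String)
    (hc : c.countP (fun t => pvKey t == κ) ≤ 1) (hs : s ∈ c) (hκ : pvKey s = κ)
    (he : s.getD k "" = "") : pvFirst c κ k = "" := by
  induction c with
  | nil => rfl
  | cons h t ih =>
    rw [List.countP_cons] at hc
    by_cases hm : pvKey h = κ ∧ ¬ h.getD k "" = ""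
    · exfalso
      have hne : s ≠ h := fun he' => hm.2 (he' ▸ he)
      have hst : s ∈ t := (List.mem_cons.mp hs).resolve_left hne
      have h1 : 0 < t.countP (fun t => pvKey t == κ) :=
        List.countP_pos_iff.mpr ⟨s, hst, by simp [hκ]⟩
      have hbeq : (pvKey h == κ) = true := by simp [hm.1]
      rw [if_pos hbeq] at hc; omega
    · rw [pvFirst, if_neg hm]
      rcases List.mem_cons.mp hs with he' | hst
      · subst he'
        refine pvFirst_of_countP_zero t κ k ?_
        have hbeq : (pvKey s == κ) = true := by simp [hκ]
        rw [if_pos hbeq] at hc; omega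
      · exact ih (by omega) hst

theorem target_cons (c : List (List String)) (a b x2 x3 x4 x5 x6 : String) (t : List String) :
    pvTarget c (a::b::x2::x3::x4::x5::x6::t) =
      a::b::(pvW x2 c (a,b) 2)::(pvW x3 c (a,b) 3)::(pvW x4 c (a,b) 4)::(pvW x5 c (a,b) 5)::(pvW x6 c (a,b) 6)::t := by
  simp [pvTarget, pvPick, pvW, pvKey, List.getD, List.set]

theorem target_key (c : List (List String)) (s : List String) :
    pvKey (pvTarget c s) = pvKey s := by
  have h0 : ∀ (l : List String) (i : Nat) (v : String), 2 ≤ i →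
      (l.set i v).getD 0 "" = l.getD 0 "" ∧ (l.set i v).getD 1 "" = l.getD 1 "" := by
    intro l i v hi
    constructor <;> (rw [List.getD, List.getD, List.getElem?_set_ne (by omega)])
  rw [pvKey, pvKey]
  simp only [pvTarget]
  rw [(h0 _ 6 _ (by omega)).1, (h0 _ 5 _ (by omega)).1, (h0 _ 4 _ (by omega)).1,
      (h0 _ 3 _ (by omega)).1, (h0 _ 2 _ (by omega)).1,
      (h0 _ 6 _ (by omega)).2, (h0 _ 5 _ (by omega)).2, (h0 _ 4 _ (by omega)).2,
      (h0 _ 3 _ (by omega)).2, (h0 _ 2 _ (by omega)).2]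

theorem target_single (c : List (List String)) (s : List String)
    (hc : c.countP (fun t => pvKey t == pvKey s) ≤ 1) (hs : s ∈ c) :
    pvTarget c s = s := by
  have hp : ∀ k, pvPick c s k = s.getD k "" := by
    intro k
    rw [pvPick]
    split_ifs with h
    · rw [pvFirst_single c (pvKey s) k s hc hs rfl h, h]
    · rfl
  rw [pvTarget, hp, hp, hp, hp, hp,
    set_getD_self, set_getD_self, set_getD_self, set_getD_self, set_getD_self]

theorem len7_destruct (s : List String) (h : 7 ≤ s.length) :
    ∃ a b x2 x3 x4 x5 x6 t, s = a::b::x2::x3::x4::x5::x6::t := by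
  rcases s with _|⟨a,_|⟨b,_|⟨x2,_|⟨x3,_|⟨x4,_|⟨x5,_|⟨x6,t⟩⟩⟩⟩⟩⟩⟩ <;>
    first
      | exact ⟨_, _, _, _, _, _, _, _, rfl⟩
      | (exfalso; simp at h)

theorem fieldchar (c : List (List String))
    (hpre : ∀ r ∈ c, 2 ≤ r.length ∧ (2 ≤ c.countP (fun s => pvKey s == pvKey r) → 7 ≤ r.length))
    (s : List String) (hs : s ∈ c) (k : Nat) (hk2 : 2 ≤ k) (hk6 : k ≤ 6) :
    (pvTarget c s).getD k "" = pvPick c s k := by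
  by_cases hcnt : 2 ≤ c.countP (fun t => pvKey t == pvKey s)
  · have hlen : 7 ≤ s.length := (hpre s hs).2 hcnt
    obtain ⟨a, b, x2, x3, x4, x5, x6, t, rfl⟩ := len7_destruct s hlen
    rw [target_cons]
    have hab : pvKey (a::b::x2::x3::x4::x5::x6::t) = (a, b) := by simp [pvKey, List.getD]
    interval_cases k <;> simp [List.getD, pvPick, pvW, hab]
  · rw [target_single c s (by omega) hs]
    rw [pvPick]
    split_ifs with h
    · rw [pvFirst_single c (pvKey s) k s (by omega) hs rfl h, h]
    · rfl

theorem pvDL (c : List (List String)) (κ : String × String) (k : Nat) (X : String) :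
    ∀ pre : List (List String),
      (∀ s ∈ pre, (pvTarget c s).getD k "" = pvPick c s k) →
      (if pvFirst pre κ k = "" then X else pvFirst pre κ k) = pvFirst c κ k →
      (if pvFirst (pre.map (pvTarget c)) κ k = "" then X
       else pvFirst (pre.map (pvTarget c)) κ k) = pvFirst c κ k := by
  intro pre
  induction pre with
  | nil => intro _ h; exact h
  | cons s pre ih =>
    intro hchar hyp
    have hcs := hchar s (List.mem_cons_self ..)
    have hct : ∀ s' ∈ pre, (pvTarget c s').getD k "" = pvPick c s' k :=
      fun s' hs' => hchar s' (List.mem_cons_of_mem _ hs')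
    by_cases hks : pvKey s = κ
    · by_cases hne : s.getD k "" = ""
      · -- s's field is empty: s contributes nothing on the original side
        have hv1 : pvFirst (s :: pre) κ k = pvFirst pre κ k := by
          rw [pvFirst, if_neg (fun hcon => hcon.2 hne)]
        rw [hv1] at hyp
        have htv : (pvTarget c s).getD k "" = pvFirst c κ k := by
          rw [hcs, pvPick, if_pos hne, hks]
        by_cases hP : pvFirst c κ k = ""
        · have hv2 : pvFirst ((s :: pre).map (pvTarget c)) κ k
              = pvFirst (pre.map (pvTarget c)) κ k := by
            rw [List.map_cons, pvFirst, if_neg (fun hcon => hcon.2 (htv.trans hP))]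
          rw [hv2]
          exact ih hct hyp
        · have hv2 : pvFirst ((s :: pre).map (pvTarget c)) κ k
              = (pvTarget c s).getD k "" := by
            rw [List.map_cons, pvFirst,
              if_pos ⟨(target_key c s).trans hks, fun hh => hP (htv.symm.trans hh)⟩]
          rw [hv2, htv, if_neg hP]
      · -- s's field is non-empty: it is the first donor on both sides
        have hv1 : pvFirst (s :: pre) κ k = s.getD k "" := by
          rw [pvFirst, if_pos ⟨hks, hne⟩]
        have hv2 : pvFirst ((s :: pre).map (pvTarget c)) κ k = s.getD k "" := by
          rw [List.map_cons, pvFirst,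
            if_pos ⟨(target_key c s).trans hks, by rw [hcs, pvPick, if_neg hne]; exact hne⟩]
          rw [hcs, pvPick, if_neg hne]
        rw [hv1] at hyp
        rw [hv2]
        exact hyp
    · have hv1 : pvFirst (s :: pre) κ k = pvFirst pre κ k := by
        rw [pvFirst, if_neg (fun hcon => hks hcon.1)]
      have hv2 : pvFirst ((s :: pre).map (pvTarget c)) κ k
          = pvFirst (pre.map (pvTarget c)) κ k := by
        rw [List.map_cons, pvFirst,
          if_neg (fun hcon => hks ((target_key c s).symm.trans hcon.1))]
      rw [hv1] at hyp
      rw [hv2]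
      exact ih hct hyp

theorem pvOuter_main (c : List (List String))
    (hpre : ∀ r ∈ c, 2 ≤ r.length ∧ (2 ≤ c.countP (fun s => pvKey s == pvKey r) → 7 ≤ r.length)) :
    ∀ (suf pre : List (List String)), c = pre ++ suf →
      pvOuter (pre.map (pvTarget c)) suf = c.map (pvTarget c) := by
  intro suf
  induction suf with
  | nil =>
    intro pre hc
    rw [List.append_nil] at hc
    subst hc
    rfl
  | cons r rest ih =>
    intro pre hc
    have hr : r ∈ c := by rw [hc]; exact List.mem_append_right _ (List.mem_cons_self ..)
    rw [pvOuter]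
    have hfold : rest.foldl pvFillFrom ((pre.map (pvTarget c)).foldl pvFillFrom r)
        = (pre.map (pvTarget c) ++ rest).foldl pvFillFrom r := (List.foldl_append ..).symm
    have hr' : rest.foldl pvFillFrom ((pre.map (pvTarget c)).foldl pvFillFrom r) = pvTarget c r := by
      rw [hfold]
      by_cases hmul : 2 ≤ c.countP (fun s => pvKey s == pvKey r)
      · obtain ⟨a, b, x2, x3, x4, x5, x6, t, rfl⟩ := len7_destruct r ((hpre r hr).2 hmul)
        rw [inner7, target_cons]
        have comp : ∀ (x : String) (i : Nat), 2 ≤ i → i ≤ 6 →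
            ((a::b::x2::x3::x4::x5::x6::t : List String).getD i "" = x) →
            pvW x (pre.map (pvTarget c) ++ rest) (a, b) i = pvW x c (a, b) i := by
          intro x i h2 h6 hx
          by_cases hxe : x = ""
          · rw [pvW, pvW, if_pos hxe, if_pos hxe]
            rw [pvFirst_append]
            refine pvDL c (a, b) i (pvFirst rest (a, b) i) pre
              (fun s hs => fieldchar c hpre s (by rw [hc]; exact List.mem_append_left _ hs) i h2 h6) ?_
            have hrr : pvFirst ((a::b::x2::x3::x4::x5::x6::t) :: rest) (a, b) i
                = pvFirst rest (a, b) i := by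
              rw [pvFirst, if_neg (fun hcon => hcon.2 (hx.trans hxe))]
            rw [hc, pvFirst_append, hrr]
          · rw [pvW, pvW, if_neg hxe, if_neg hxe]
        rw [comp x2 2 (by omega) (by omega) (by simp [List.getD]),
            comp x3 3 (by omega) (by omega) (by simp [List.getD]),
            comp x4 4 (by omega) (by omega) (by simp [List.getD]),
            comp x5 5 (by omega) (by omega) (by simp [List.getD]),
            comp x6 6 (by omega) (by omega) (by simp [List.getD])]
      · -- no partner: nothing matches r's key, and r is already its own target
        have hsum : c.countP (fun s => pvKey s == pvKey r)
            = pre.countP (fun s => pvKey s == pvKey r)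
              + (rest.countP (fun s => pvKey s == pvKey r) + 1) := by
          rw [hc, List.countP_append, List.countP_cons, if_pos (by simp)]
        have hpre0 : pre.countP (fun s => pvKey s == pvKey r) = 0 := by omega
        have hrest0 : rest.countP (fun s => pvKey s == pvKey r) = 0 := by omega
        have hnom : ∀ d ∈ pre.map (pvTarget c) ++ rest, ¬ pvKey d = pvKey r := by
          intro d hd
          rcases List.mem_append.mp hd with hd | hd
          · obtain ⟨s, hs, rfl⟩ := List.mem_map.mp hd
            have := List.countP_eq_zero.mp hpre0 s hs
            rw [target_key]
            simpa using this
          · have := List.countP_eq_zero.mp hrest0 d hd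
            simpa using this
        rw [inner_nomatch _ _ hnom, target_single c r (by omega) hr]
    rw [hr']
    have : pre.map (pvTarget c) ++ [pvTarget c r] = (pre ++ [r]).map (pvTarget c) := by
      simp
    rw [this]
    exact ih (pre ++ [r]) (by rw [hc]; simp)



def pvFirstNE (l : List (List String)) (k : Nat) : String :=
  match l with
  | [] => ""
  | s :: t => if ¬ s.getD k "" = "" then s.getD k "" else pvFirstNE t k

def pvU (x : String) (row : List String) (k : Nat) : String :=
  if x = "" ∧ ¬ row.getD k "" = "" then row.getD k "" else x

theorem counts_getD (c : List (List String)) (κ : String × String) :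
    (c.foldl (fun d row =>
        d.insert (row.getD 0 "", row.getD 1 "") (d.getD (row.getD 0 "", row.getD 1 "") 0 + 1))
      (PySem.Dict.empty : PySem.Dict (String × String) Int)).getD κ 0
      = ((c.map pvKey).count κ : Int) := by
  have h1 : c.foldl (fun d row =>
        d.insert (row.getD 0 "", row.getD 1 "") (d.getD (row.getD 0 "", row.getD 1 "") 0 + 1))
      (PySem.Dict.empty : PySem.Dict (String × String) Int)
      = (c.map pvKey).foldl (fun d x => d.insert x (d.getD x 0 + 1)) PySem.Dict.empty := by
    rw [List.foldl_map]
    rfl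
  rw [h1, PySem.Dict.getD_foldl_insert_add_one, PySem.Dict.getD_empty]
  ring

theorem count_map_key (c : List (List String)) (κ : String × String) :
    (c.map pvKey).count κ = c.countP (fun s => pvKey s == κ) := by
  induction c with
  | nil => rfl
  | cons s c ih => simp [List.count_cons, List.countP_cons, ih]

theorem updF_shape (f0 f1 f2 f3 f4 : String) (row : List String) :
    pvUpdF [f0, f1, f2, f3, f4] row
      = [pvU f0 row 2, pvU f1 row 3, pvU f2 row 4, pvU f3 row 5, pvU f4 row 6] := by
  by_cases h0 : f0 = "" ∧ ¬ row[2]?.getD "" = "" <;>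
  by_cases h1 : f1 = "" ∧ ¬ row[3]?.getD "" = "" <;>
  by_cases h2 : f2 = "" ∧ ¬ row[4]?.getD "" = "" <;>
  by_cases h3 : f3 = "" ∧ ¬ row[5]?.getD "" = "" <;>
  by_cases h4 : f4 = "" ∧ ¬ row[6]?.getD "" = "" <;>
    simp [pvUpdF, pvU, List.getD_cons_zero, List.getD_cons_succ, h0, h1, h2, h3, h4]

theorem fillRow_shape (g0 g1 g2 g3 g4 a b x2 x3 x4 x5 x6 : String) (t : List String) :
    pvFillRow [g0, g1, g2, g3, g4] (a::b::x2::x3::x4::x5::x6::t)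
      = a::b::(if x2 = "" then g0 else x2)::(if x3 = "" then g1 else x3)::
        (if x4 = "" then g2 else x4)::(if x5 = "" then g3 else x5)::
        (if x6 = "" then g4 else x6)::t := by
  by_cases h0 : x2 = "" <;> by_cases h1 : x3 = "" <;> by_cases h2 : x4 = "" <;>
  by_cases h3 : x5 = "" <;> by_cases h4 : x6 = "" <;>
    simp [pvFillRow, List.getD_cons_zero, List.getD_cons_succ, h0, h1, h2, h3, h4]

def pvV (x : String) (rows : List (List String)) (k : Nat) : String :=
  if x = "" then pvFirstNE rows k else x

theorem pvV_cons (x : String) (row : List String) (rows : List (List String)) (k : Nat) :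
    pvV (pvU x row k) rows k = pvV x (row :: rows) k := by
  by_cases hx : x = "" <;> simp [pvV, pvU, pvFirstNE, hx] <;>
    by_cases hr : row[k]?.getD "" = "" <;> simp [hr]

theorem foldF_shape (rows : List (List String)) :
    ∀ f0 f1 f2 f3 f4 : String,
      rows.foldl pvUpdF [f0, f1, f2, f3, f4]
        = [pvV f0 rows 2, pvV f1 rows 3, pvV f2 rows 4, pvV f3 rows 5, pvV f4 rows 6] := by
  induction rows with
  | nil => intro f0 f1 f2 f3 f4; simp [pvV, pvFirstNE]
  | cons row rows ih =>
    intro f0 f1 f2 f3 f4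
    rw [List.foldl_cons, updF_shape, ih,
      pvV_cons, pvV_cons, pvV_cons, pvV_cons, pvV_cons]

theorem firstNE_filter (c : List (List String)) (κ : String × String) (k : Nat) :
    pvFirstNE (c.filter (fun s => pvKey s == κ)) k = pvFirst c κ k := by
  induction c with
  | nil => rfl
  | cons s c ih =>
    by_cases hκ : pvKey s = κ
    · rw [List.filter_cons_of_pos (by simp [hκ])]
      by_cases hne : s.getD k "" = ""
      · rw [pvFirstNE, if_neg (by simpa using hne), pvFirst, if_neg (fun h => h.2 hne), ih]
      · rw [pvFirstNE, if_pos hne, pvFirst, if_pos ⟨hκ, hne⟩]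
    · rw [List.filter_cons_of_neg (by simp [hκ]), pvFirst, if_neg (fun h => hκ h.1), ih]

theorem fills_getD (P : (String × String) → Prop) [DecidablePred P] (d0 : List String)
    (c : List (List String)) (κ : String × String) :
    ∀ d : PySem.Dict (String × String) (List String),
      (c.foldl (fun d row =>
          if P (row.getD 0 "", row.getD 1 "") then
            d.insert (row.getD 0 "", row.getD 1 "")
              (pvUpdF (d.getD (row.getD 0 "", row.getD 1 "") d0) row)
          else d) d).getD κ d0
        = if P κ then
            (c.filter (fun row => pvKey row == κ)).foldl (fun f row => pvUpdF f row) (d.getD κ d0)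
          else d.getD κ d0 := by
  induction c with
  | nil => intro d; split_ifs <;> rfl
  | cons row c ih =>
    intro d
    rw [List.foldl_cons]
    by_cases hP : P (row.getD 0 "", row.getD 1 "")
    · rw [if_pos hP]
      by_cases hκ : pvKey row = κ
      · have hκ' : (row.getD 0 "", row.getD 1 "") = κ := hκ
        rw [hκ'] at hP ⊢
        rw [ih, List.filter_cons_of_pos (by simp [hκ]), List.foldl_cons,
          PySem.Dict.getD_insert_self, if_pos hP, if_pos hP]
      · have hκ' : κ ≠ (row.getD 0 "", row.getD 1 "") := fun h => hκ h.symm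
        rw [ih, PySem.Dict.getD_insert, if_neg hκ',
          List.filter_cons_of_neg (by simp [hκ])]
    · rw [if_neg hP, ih]
      by_cases hκ : pvKey row = κ
      · have : ¬ P κ := fun h => hP (by rw [show (row.getD 0 "", row.getD 1 "") = κ from hκ]; exact h)
        rw [if_neg this, if_neg this]
      · rw [List.filter_cons_of_neg (by simp [hκ])]


theorem rowchar (c : List (List String))
    (hpre : ∀ r ∈ c, 2 ≤ r.length ∧ (2 ≤ c.countP (fun s => pvKey s == pvKey r) → 7 ≤ r.length))
    (row : List String) (hrow : row ∈ c) :
    (if 1 < (c.foldl (fun d row =>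
          d.insert (row.getD 0 "", row.getD 1 "") (d.getD (row.getD 0 "", row.getD 1 "") 0 + 1))
          (PySem.Dict.empty : PySem.Dict (String × String) Int)).getD (row.getD 0 "", row.getD 1 "") 0 then
        pvFillRow ((c.foldl (fun d row =>
            if 1 < (c.foldl (fun d row =>
                d.insert (row.getD 0 "", row.getD 1 "") (d.getD (row.getD 0 "", row.getD 1 "") 0 + 1))
                (PySem.Dict.empty : PySem.Dict (String × String) Int)).getD (row.getD 0 "", row.getD 1 "") 0 then
              d.insert (row.getD 0 "", row.getD 1 "")
                (pvUpdF (d.getD (row.getD 0 "", row.getD 1 "") ["", "", "", "", ""]) row)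
            else d) (PySem.Dict.empty : PySem.Dict (String × String) (List String))).getD
          (row.getD 0 "", row.getD 1 "") ["", "", "", "", ""]) row
      else row) = pvTarget c row := by
  have hkey : (row.getD 0 "", row.getD 1 "") = pvKey row := rfl
  have hc : ∀ κ, (c.foldl (fun d row =>
      d.insert (row.getD 0 "", row.getD 1 "") (d.getD (row.getD 0 "", row.getD 1 "") 0 + 1))
      (PySem.Dict.empty : PySem.Dict (String × String) Int)).getD κ 0
      = (c.countP (fun s => pvKey s == κ) : Int) := by
    intro κ; rw [counts_getD, count_map_key]
  by_cases hm : 2 ≤ c.countP (fun s => pvKey s == pvKey row)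
  · rw [if_pos (by rw [hkey, hc]; exact_mod_cast hm)]
    rw [hkey, fills_getD (fun κ => 1 < (c.foldl (fun d row =>
        d.insert (row.getD 0 "", row.getD 1 "") (d.getD (row.getD 0 "", row.getD 1 "") 0 + 1))
        (PySem.Dict.empty : PySem.Dict (String × String) Int)).getD κ 0)]
    rw [if_pos (by rw [hc]; exact_mod_cast hm), PySem.Dict.getD_empty, foldF_shape]
    obtain ⟨a, b, x2, x3, x4, x5, x6, t, heq⟩ := len7_destruct row ((hpre row hrow).2 hm)
    subst heq
    have hab : pvKey (a::b::x2::x3::x4::x5::x6::t) = (a, b) := rfl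
    rw [hab, fillRow_shape, target_cons]
    simp only [pvV, if_pos rfl, firstNE_filter, pvW, if_true]
  · rw [if_neg (by rw [hkey, hc]; intro h; exact hm (by exact_mod_cast h)),
      target_single c row (by omega) hrow]

theorem altfold (cnts : PySem.Dict (String × String) Int)
    (fls : PySem.Dict (String × String) (List String)) (T : List String → List String)
    (c : List (List String))
    (hT : ∀ row ∈ c,
      (if 1 < cnts.getD (row.getD 0 "", row.getD 1 "") 0 then
        pvFillRow (fls.getD (row.getD 0 "", row.getD 1 "") ["", "", "", "", ""]) row
      else row) = T row) :
    ∀ l : List (List String), (∀ x ∈ l, x ∈ c) →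
      ∀ (acc : List (List String)) (seen : PySem.Set (List String)),
        (∀ x, x ∈ seen ↔ x ∈ acc) →
        (l.foldl (fun (st : List (List String) × PySem.Set (List String)) row =>
            let row := if 1 < cnts.getD (row.getD 0 "", row.getD 1 "") 0 then
                pvFillRow (fls.getD (row.getD 0 "", row.getD 1 "") ["", "", "", "", ""]) row
              else row
            if row.length < 8 ∧ row ∉ st.2 then (st.1 ++ [row], PySem.Set.add st.2 row) else st)
          (acc, seen)).1
        = (l.map T).foldl
            (fun acc rows => if rows ∉ acc ∧ rows.length < 8 then acc ++ [rows] else acc) acc := by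
  intro l
  induction l with
  | nil => intro _ acc seen _; rfl
  | cons row l ih =>
    intro hmem acc seen hinv
    simp only [List.foldl_cons, List.map_cons]
    rw [hT row (hmem row (List.mem_cons_self ..))]
    have hmem' : ∀ x ∈ l, x ∈ c := fun x hx => hmem x (List.mem_cons_of_mem _ hx)
    by_cases h : (T row).length < 8 ∧ T row ∉ seen
    · rw [if_pos h, if_pos ⟨fun hm => h.2 ((hinv _).mpr hm), h.1⟩]
      exact ih hmem' _ _ (fun x => by
        rw [PySem.Set.mem_add, List.mem_append, List.mem_singleton, hinv x])
    · rw [if_neg h, if_neg (fun hcon => h ⟨hcon.2, fun hm => hcon.1 ((hinv _).mp hm)⟩)]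
      exact ih hmem' _ _ hinv

-- ===== VERDICT (by name: the statement is the Claim_ definition above) =====
theorem merge_duplicates_spec : Claim_equal_merge_duplicates := by
  intro c _ hpre
  obtain ⟨-, hpre2⟩ := hpre
  show merge_duplicates c = merge_duplicates_alt c
  have hA : pvOuter ([] : List (List String)) c = c.map (pvTarget c) :=
    pvOuter_main c hpre2 c [] rfl
  have hB : merge_duplicates_alt c
      = (c.map (pvTarget c)).foldl
          (fun acc rows => if rows ∉ acc ∧ rows.length < 8 then acc ++ [rows] else acc) [] := by
    refine altfold _ _ (pvTarget c) c (fun row hrow => rowchar c hpre2 row hrow) c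
      (fun x hx => hx) [] PySem.Set.empty (fun x => ?_)
    simp [PySem.Set.empty]
  rw [hB]
  simp only [merge_duplicates]
  rw [hA]
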